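-- pv_equiv track=rewrite | github.com/BasilKarol/basic-CS-algorithms-in-python | heap_quick/heap_sort.py | HEAP_SORT_PLUS
-- ===== SOURCE A (Python) =====
-- def v_sum( *vectors ):
--     dim = len( vectors[0] )
--     return ( sum(vector[i] for vector in vectors) for i in range(dim))
--
-- def HEAPIFY_PLUS(A, i, i_stop):
--     przyp=0
--     por=0
--
--     left_i = i*2 + 1
--     right_i = i*2 + 2
--     Largest = i
--
--     if left_i < len(A[:i_stop]):
--         if A[:i_stop][Largest] < A[:i_stop][left_i]:
--             Largest = left_i
--     if right_i < len(A[:i_stop]):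
--         if A[:i_stop][Largest] < A[:i_stop][right_i]:
--             Largest = right_i
--     por += 2
--     if i != Largest:
--         A[i], A[Largest] = A[Largest], A[i]
--         przyp += 3
--         przyp, por = v_sum(
--             HEAPIFY_PLUS(A, Largest, i_stop),
--             (przyp, por)
--             )
--
--     return przyp, por
--
-- def BUILD_HEAP_PLUS(A):
--     przyp = 0
--     por = 0
--     for i in reversed( range( (len(A))//2 ) ):
--         przyp, por = v_sum(
--             HEAPIFY_PLUS(A, i, len(A)),
--             (przyp, por)
--             )
--
--     return przyp, por
--
-- def HEAP_SORT_PLUS(A):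
--     przyp, por = BUILD_HEAP_PLUS(A)
--     for i in reversed( range(1, len(A)) ):
--         A[0], A[i] = A[i], A[0]
--         przyp += 3
--         przyp, por = v_sum(
--             HEAPIFY_PLUS(A, 0, i),
--             (przyp, por)
--             )
--     return przyp, por
-- ===== SOURCE B (Python) =====
-- # B: counts heap-sort operations abstractly -- each sift-down returns its SWAP
-- # count k (costing k+1 steps), and the counters are recovered at the end as
-- # przyp = 3*swaps, por = 2*steps; no counter threading, no slicing, no v_sum.
-- # Like A, mutates A in place (sorts it); equivalence is about the return value.
-- def HEAP_SORT_PLUS(A):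
--     n = len(A)
--
--     def sift(i, stop):
--         # iterative sift-down; returns the number of swaps it performed
--         k = 0
--         while True:
--             m = i
--             l, r = 2 * i + 1, 2 * i + 2
--             if l < stop and A[m] < A[l]:
--                 m = l
--             if r < stop and A[m] < A[r]:
--                 m = r
--             if m == i:
--                 return k
--             A[i], A[m] = A[m], A[i]
--             k += 1
--             i = m
--
--     swaps = 0   # total swaps (3 assignments each)
--     steps = 0   # total sift-down steps (2 comparisons each)
--     for i in range(n // 2 - 1, -1, -1):
--         k = sift(i, n)
--         swaps += k
--         steps += k + 1
--     for i in range(n - 1, 0, -1):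
--         A[0], A[i] = A[i], A[0]
--         k = sift(0, i)
--         swaps += k + 1
--         steps += k + 1
--     return 3 * swaps, 2 * steps
-- ===== Notes on version B (the rewrite author's own statement) =====
-- stated objective: faster
-- what changed: Instead of threading (przyp, por) counters through a recursive HEAPIFY with generator-based v_sum addition and A[:i_stop] slices, B's sift-down is an iterative loop that only returns its swap count k (costing k+1 comparison steps), the two loops accumulate plain swap/step totals, and the counters are recovered once at the end as (3*swaps, 2*steps).
import Mathlib
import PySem

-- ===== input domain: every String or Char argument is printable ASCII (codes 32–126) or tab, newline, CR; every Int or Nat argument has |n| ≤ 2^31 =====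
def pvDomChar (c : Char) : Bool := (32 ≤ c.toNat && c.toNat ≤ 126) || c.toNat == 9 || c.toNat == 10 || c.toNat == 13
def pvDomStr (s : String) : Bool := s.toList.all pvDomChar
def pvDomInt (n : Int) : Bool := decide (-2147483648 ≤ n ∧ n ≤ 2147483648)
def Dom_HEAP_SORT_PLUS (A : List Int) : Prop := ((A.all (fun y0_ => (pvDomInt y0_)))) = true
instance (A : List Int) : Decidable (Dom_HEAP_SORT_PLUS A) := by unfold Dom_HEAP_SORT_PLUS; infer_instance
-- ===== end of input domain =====

-- B drops A's counter threading (recursive HEAPIFY + v_sum + A[:i_stop] slices):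
-- its sift-down only returns a swap count and the counters are recovered at the
-- end as (3*swaps, 2*steps); return-value equivalence only (both Pythons sort A
-- in place the same way).

-- ===== PORT A =====
-- A's HEAPIFY_PLUS computes Largest against the slice A[:i_stop] (length = min i_stop |A|).
-- All indexing in A is in range on every input, so List.getD is exact here.
def largestA (A : List Int) (i s : Nat) : Nat :=
  let As := A.take s
  let l := 2 * i + 1
  let r := 2 * i + 2
  let L1 := if l < As.length then (if As.getD i 0 < As.getD l 0 then l else i) else i
  if r < As.length then (if As.getD L1 0 < As.getD r 0 then r else L1) else L1

theorem largestA_bounds (A : List Int) (i s : Nat) (h : largestA A i s ≠ i) :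
    i < largestA A i s ∧ largestA A i s < s := by
  unfold largestA at *
  dsimp only at *
  have : (A.take s).length ≤ s := by simp [List.length_take]
  split_ifs at * <;> omega

-- HEAPIFY_PLUS: the mutated list is threaded explicitly as part of the state.
def heapifyA (A : List Int) (i s : Nat) : List Int × Int × Int :=
  let L := largestA A i s
  if h : i ≠ L then
    let A' := (A.set i (A.getD L 0)).set L (A.getD i 0)
    let rec' := heapifyA A' L s
    (rec'.1, 3 + rec'.2.1, 2 + rec'.2.2)
  else (A, 0, 2)
termination_by s - i
decreasing_by
  have := largestA_bounds A i s (fun he => h he.symm)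
  omega

def buildA (A : List Int) : List Int × Int × Int :=
  (List.range (A.length / 2)).reverse.foldl
    (fun st i =>
      let r := heapifyA st.1 i st.1.length
      (r.1, r.2.1 + st.2.1, r.2.2 + st.2.2))
    (A, 0, 0)

def HEAP_SORT_PLUS (A : List Int) : Int × Int :=
  let st0 := buildA A
  let st := ((List.range A.length).drop 1).reverse.foldl
    (fun st i =>
      let A1 := (st.1.set 0 (st.1.getD i 0)).set i (st.1.getD 0 0)
      let r := heapifyA A1 0 i
      (r.1, r.2.1 + (st.2.1 + 3), r.2.2 + st.2.2))
    st0
  (st.2.1, st.2.2)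

-- ===== PORT B =====
-- `child A s m c` is one "if c < stop and A[m] < A[c]: m = c" update of B's sift.
def child (A : List Int) (s m c : Nat) : Nat :=
  if c < s ∧ A.getD m 0 < A.getD c 0 then c else m

theorem child2_bounds (A : List Int) (i s : Nat)
    (h : child A s (child A s i (2 * i + 1)) (2 * i + 2) ≠ i) :
    i < child A s (child A s i (2 * i + 1)) (2 * i + 2) ∧
      child A s (child A s i (2 * i + 1)) (2 * i + 2) < s := by
  unfold child at *
  split_ifs at * <;> omega

-- B's while-loop: k accumulates the number of swaps performed so far.
def siftB (A : List Int) (i s k : Nat) : List Int × Nat :=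
  let m := child A s (child A s i (2 * i + 1)) (2 * i + 2)
  if h : m = i then (A, k)
  else siftB ((A.set i (A.getD m 0)).set m (A.getD i 0)) m s (k + 1)
termination_by s - i
decreasing_by
  have := child2_bounds A i s h
  omega

-- first for-loop: c counts how many build indices remain (i = c-1 down to 0)
def buildB (A : List Int) (n c sw st : Nat) : List Int × Nat × Nat :=
  match c with
  | 0 => (A, sw, st)
  | Nat.succ j =>
      let r := siftB A j n 0
      buildB r.1 n j (sw + r.2) (st + r.2 + 1)

-- second for-loop: i runs from n-1 down to 1
def sortB (A : List Int) (i sw st : Nat) : List Int × Nat × Nat :=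
  match i with
  | 0 => (A, sw, st)
  | Nat.succ j =>
      let A1 := (A.set 0 (A.getD (j + 1) 0)).set (j + 1) (A.getD 0 0)
      let r := siftB A1 0 (j + 1) 0
      sortB r.1 j (sw + r.2 + 1) (st + r.2 + 1)

def HEAP_SORT_PLUS_alt (A : List Int) : Int × Int :=
  let n := A.length
  let b := buildB A n (n / 2) 0 0
  let s := sortB b.1 (n - 1) b.2.1 b.2.2
  (((3 * s.2.1 : Nat) : Int), ((2 * s.2.2 : Nat) : Int))

-- ===== PRECONDITION & SPEC =====
def Spec_HEAP_SORT_PLUS (A : List Int) (out : Int × Int) : Prop := out = HEAP_SORT_PLUS_alt A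
instance (A : List Int) (out : Int × Int) : Decidable (Spec_HEAP_SORT_PLUS A out) := by unfold Spec_HEAP_SORT_PLUS; infer_instance

-- ===== CLAIM (what is proved, stated in full; the proofs are below) =====
def Claim_equal_HEAP_SORT_PLUS : Prop := ∀ (A : List Int), Dom_HEAP_SORT_PLUS A → Spec_HEAP_SORT_PLUS A (HEAP_SORT_PLUS A)

-- ===== LEMMAS AND PROOFS =====

theorem getD_take (A : List Int) (s k : Nat) (hk : k < s) (hs : s ≤ A.length) :
    (A.take s).getD k 0 = A.getD k 0 := by
  have h1 : k < (A.take s).length := by simp [List.length_take]; omega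
  have h2 : k < A.length := by omega
  rw [List.getD_eq_getElem _ _ h1, List.getD_eq_getElem _ _ h2, List.getElem_take]

theorem largest_eq (A : List Int) (i s : Nat) (hs : s ≤ A.length) :
    largestA A i s = child A s (child A s i (2 * i + 1)) (2 * i + 2) := by
  unfold largestA child
  dsimp only
  have hlen : (A.take s).length = s := by simp [List.length_take]; omega
  simp only [hlen]
  by_cases hl : 2 * i + 1 < s
  · have hi : i < s := by omega
    rw [getD_take A s i hi hs, getD_take A s (2 * i + 1) hl hs]
    simp only [hl, if_true, true_and]
    by_cases hc : A.getD i 0 < A.getD (2 * i + 1) 0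
    · simp only [hc, if_true]
      by_cases hr : 2 * i + 2 < s
      · rw [getD_take A s (2 * i + 1) hl hs, getD_take A s (2 * i + 2) hr hs]
        simp [hr]
      · simp [hr]
    · simp only [hc, if_false]
      by_cases hr : 2 * i + 2 < s
      · rw [getD_take A s i hi hs, getD_take A s (2 * i + 2) hr hs]
        simp [hr]
      · simp [hr]
  · have hr : ¬ (2 * i + 2 < s) := by omega
    simp [hl, hr]

theorem heapifyA_length (A : List Int) (i s : Nat) :
    (heapifyA A i s).1.length = A.length := by
  rw [heapifyA]
  split
  · rw [heapifyA_length]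
    simp
  · rfl
termination_by s - i
decreasing_by
  have := largestA_bounds A i s (by omega)
  omega

-- B's accumulator only shifts the swap count
theorem siftB_acc (A : List Int) (i s k : Nat) :
    siftB A i s k = ((siftB A i s 0).1, k + (siftB A i s 0).2) := by
  conv_lhs => rw [siftB]
  conv_rhs => rw [siftB]
  by_cases h : child A s (child A s i (2 * i + 1)) (2 * i + 2) = i
  · simp [h]
  · rw [dif_neg h, dif_neg h]
    rw [siftB_acc _ _ _ (k + 1), siftB_acc _ _ _ (0 + 1)]
    simp only [Prod.mk.injEq]
    exact ⟨trivial, by omega⟩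
termination_by s - i
decreasing_by
  all_goals have := child2_bounds A i s h; omega

-- A's heapify counters are determined by B's swap count
theorem sift_bridge (A : List Int) (i s : Nat) (hs : s ≤ A.length) :
    heapifyA A i s =
      ((siftB A i s 0).1, ((3 * (siftB A i s 0).2 : Nat) : Int),
        ((2 * (siftB A i s 0).2 + 2 : Nat) : Int)) := by
  rw [heapifyA, siftB, largest_eq A i s hs]
  by_cases h : child A s (child A s i (2 * i + 1)) (2 * i + 2) = i
  · rw [dif_neg (not_not_intro h.symm), dif_pos h]
    simp
  · rw [dif_pos (fun he => h he.symm), dif_neg h]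
    dsimp only
    rw [sift_bridge _ _ _ (by simpa using hs), siftB_acc _ _ _ (0 + 1)]
    simp only [Prod.mk.injEq]
    refine ⟨trivial, by push_cast; ring, by push_cast; ring⟩
termination_by s - i
decreasing_by
  all_goals have := child2_bounds A i s h; omega

theorem siftB_length (A : List Int) (i s : Nat) (hs : s ≤ A.length) :
    (siftB A i s 0).1.length = A.length := by
  have h := congrArg (fun p => p.1.length) (sift_bridge A i s hs)
  dsimp at h
  rw [← h, heapifyA_length]

-- the build loops agree: A's foldl state is B's state with counters scaled
theorem build_bridge (n : Nat) :
    ∀ (c : Nat) (B : List Int) (sw st : Nat), B.length = n →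
      (List.range c).reverse.foldl
        (fun stt i =>
          let r := heapifyA stt.1 i stt.1.length
          (r.1, r.2.1 + stt.2.1, r.2.2 + stt.2.2))
        (B, ((3 * sw : Nat) : Int), ((2 * st : Nat) : Int)) =
      ((buildB B n c sw st).1, ((3 * (buildB B n c sw st).2.1 : Nat) : Int),
        ((2 * (buildB B n c sw st).2.2 : Nat) : Int)) := by
  intro c
  induction c with
  | zero => intro B sw st h; simp [buildB]
  | succ j ih =>
    intro B sw st h
    rw [List.range_succ, List.reverse_append]
    simp only [List.reverse_singleton, List.singleton_append, List.foldl_cons]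
    have hstep := sift_bridge B j n (le_of_eq h.symm)
    have hlen := siftB_length B j n (le_of_eq h.symm)
    rw [buildB]
    rw [h, hstep]
    dsimp only
    have : ((3 * (siftB B j n 0).2 : Nat) : Int) + ((3 * sw : Nat) : Int)
        = ((3 * (sw + (siftB B j n 0).2) : Nat) : Int) := by push_cast; ring
    rw [this]
    have : ((2 * (siftB B j n 0).2 + 2 : Nat) : Int) + ((2 * st : Nat) : Int)
        = ((2 * (st + (siftB B j n 0).2 + 1) : Nat) : Int) := by push_cast; ring
    rw [this]
    exact ih _ _ _ (by rw [hlen, h])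

theorem drop1_rev_succ (j : Nat) (hj : 1 ≤ j) :
    ((List.range (j + 1)).drop 1).reverse = j :: ((List.range j).drop 1).reverse := by
  rw [List.range_succ, List.drop_append_of_le_length (by simpa using hj)]
  simp

-- the sort loops agree under the same correspondence
theorem sort_bridge (n : Nat) :
    ∀ (m : Nat) (B : List Int) (sw st : Nat), B.length = n → m ≤ n →
      ((List.range (m + 1)).drop 1).reverse.foldl
        (fun stt i =>
          let A1 := (stt.1.set 0 (stt.1.getD i 0)).set i (stt.1.getD 0 0)
          let r := heapifyA A1 0 i
          (r.1, r.2.1 + (stt.2.1 + 3), r.2.2 + stt.2.2))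
        (B, ((3 * sw : Nat) : Int), ((2 * st : Nat) : Int)) =
      ((sortB B m sw st).1, ((3 * (sortB B m sw st).2.1 : Nat) : Int),
        ((2 * (sortB B m sw st).2.2 : Nat) : Int)) := by
  intro m
  induction m with
  | zero => intro B sw st h hm; simp [sortB]
  | succ j ih =>
    intro B sw st h hm
    rw [drop1_rev_succ (j + 1) (by omega), List.foldl_cons]
    dsimp only
    have hlen1 : ((B.set 0 (B.getD (j + 1) 0)).set (j + 1) (B.getD 0 0)).length = n := by
      simp [h]
    have hstep := sift_bridge ((B.set 0 (B.getD (j + 1) 0)).set (j + 1) (B.getD 0 0)) 0 (j + 1)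
      (by rw [hlen1]; omega)
    have hlen2 := siftB_length ((B.set 0 (B.getD (j + 1) 0)).set (j + 1) (B.getD 0 0)) 0 (j + 1)
      (by rw [hlen1]; omega)
    rw [sortB]
    rw [hstep]
    dsimp only
    set k := (siftB ((B.set 0 (B.getD (j + 1) 0)).set (j + 1) (B.getD 0 0)) 0 (j + 1) 0).2 with hk
    have : ((3 * k : Nat) : Int) + (((3 * sw : Nat) : Int) + 3)
        = ((3 * (sw + k + 1) : Nat) : Int) := by push_cast; ring
    rw [this]
    have : ((2 * k + 2 : Nat) : Int) + ((2 * st : Nat) : Int)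
        = ((2 * (st + k + 1) : Nat) : Int) := by push_cast; ring
    rw [this]
    exact ih _ _ _ (by rw [hlen2, hlen1]) (by omega)

theorem drop1_range_pred (n : Nat) :
    (List.range n).drop 1 = (List.range ((n - 1) + 1)).drop 1 := by
  match n with
  | 0 => decide
  | Nat.succ k => rfl

theorem buildB_length (n : Nat) :
    ∀ (c : Nat) (B : List Int) (sw st : Nat), B.length = n →
      (buildB B n c sw st).1.length = n := by
  intro c
  induction c with
  | zero => intro B sw st h; exact h
  | succ j ih =>
    intro B sw st h
    rw [buildB]
    exact ih _ _ _ (by rw [siftB_length B j n (le_of_eq h.symm), h])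

-- ===== VERDICT (by name: the statement is the Claim_ definition above) =====
theorem HEAP_SORT_PLUS_spec : Claim_equal_HEAP_SORT_PLUS := by
  intro A _
  unfold Spec_HEAP_SORT_PLUS HEAP_SORT_PLUS HEAP_SORT_PLUS_alt buildA
  dsimp only
  have hb : ((3 * 0 : Nat) : Int) = (0 : Int) := by norm_num
  have hb2 : ((2 * 0 : Nat) : Int) = (0 : Int) := by norm_num
  rw [show ((A, (0 : Int), (0 : Int)) : List Int × Int × Int)
      = (A, ((3 * 0 : Nat) : Int), ((2 * 0 : Nat) : Int)) by norm_num]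
  rw [build_bridge A.length (A.length / 2) A 0 0 rfl]
  rw [drop1_range_pred A.length]
  rw [sort_bridge A.length (A.length - 1) _ _ _
      (buildB_length A.length (A.length / 2) A 0 0 rfl) (by omega)]
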